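-- pv_equiv track=rewrite | github.com/aneeladevsec/SENTINELAI-Unified-Threat-Defense-Detection-System- | src/detection/feature_engineering.py | _analyze_flags
-- ===== SOURCE A (Python) =====
-- from typing import Dict, List, Tuple, Any
-- from collections import defaultdict
--
-- def _analyze_flags(packets: List[Dict]) -> Dict:
--     """Analyze TCP flags"""
--     flags = defaultdict(int)
--     for packet in packets:
--         flag_set = packet.get('flags', set())
--         for flag in flag_set:
--             flags[flag] += 1
--
--     return {
--         'SYN': flags.get('SYN', 0),
--         'ACK': flags.get('ACK', 0),
--         'FIN': flags.get('FIN', 0),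
--         'RST': flags.get('RST', 0),
--         'PSH': flags.get('PSH', 0),
--         'URG': flags.get('URG', 0),
--         'CWR': flags.get('CWR', 0),
--         'ECE': flags.get('ECE', 0),
--     }
-- ===== SOURCE B (Python) =====
-- FLAGS = ('SYN', 'ACK', 'FIN', 'RST', 'PSH', 'URG', 'CWR', 'ECE')
--
-- def _analyze_flags(packets):
--     """Analyze TCP flags: count each known flag by a direct scan of all packets."""
--     return {f: sum(1 for p in packets for x in p.get('flags', set()) if x == f)
--             for f in FLAGS}
-- ===== Notes on version B (the rewrite author's own statement) =====
-- stated objective: idiomatic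
-- what changed: B drops the aggregate defaultdict counter and its final projection, and instead builds the result directly as a dict comprehension that counts each of the eight flags by its own scan over the packets' flag elements.
import Mathlib
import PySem

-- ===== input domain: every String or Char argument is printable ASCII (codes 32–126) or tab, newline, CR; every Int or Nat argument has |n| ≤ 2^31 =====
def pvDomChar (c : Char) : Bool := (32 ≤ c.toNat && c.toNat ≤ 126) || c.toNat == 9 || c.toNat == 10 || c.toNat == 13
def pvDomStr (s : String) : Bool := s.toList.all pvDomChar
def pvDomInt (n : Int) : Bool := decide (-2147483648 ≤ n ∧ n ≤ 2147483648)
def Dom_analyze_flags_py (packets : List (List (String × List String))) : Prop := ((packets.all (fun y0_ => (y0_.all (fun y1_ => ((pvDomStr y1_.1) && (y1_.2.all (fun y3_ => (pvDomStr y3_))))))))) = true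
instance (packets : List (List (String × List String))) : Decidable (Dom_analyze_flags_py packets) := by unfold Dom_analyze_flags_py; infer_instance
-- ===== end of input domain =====

-- B replaces A's aggregate count-dict + projection with a per-flag counting scan (idiomatic dict comprehension); same values.

-- ===== PORT A =====
def analyze_flags_py (packets : List (List (String × List String))) : List (String × Int) :=
  let flags := packets.foldl (fun d packet =>
    ((PySem.Dict.mk packet).getD "flags" []).foldl (fun d flag => d.modify flag 0 (· + 1)) d)
    (PySem.Dict.empty)
  [("SYN", flags.getD "SYN" 0), ("ACK", flags.getD "ACK" 0), ("FIN", flags.getD "FIN" 0),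
   ("RST", flags.getD "RST" 0), ("PSH", flags.getD "PSH" 0), ("URG", flags.getD "URG" 0),
   ("CWR", flags.getD "CWR" 0), ("ECE", flags.getD "ECE" 0)]

-- ===== PORT B =====
def analyze_flags_py_alt (packets : List (List (String × List String))) : List (String × Int) :=
  ["SYN", "ACK", "FIN", "RST", "PSH", "URG", "CWR", "ECE"].map (fun f =>
    (f, packets.foldl (fun acc p =>
      ((PySem.Dict.mk p).getD "flags" []).foldl (fun a x => if x == f then a + 1 else a) acc) 0))

-- ===== PRECONDITION & SPEC =====
def Spec_analyze_flags_py (packets : List (List (String × List String))) (out : List (String × Int)) : Prop := out = analyze_flags_py_alt packets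
instance (packets : List (List (String × List String))) (out : List (String × Int)) : Decidable (Spec_analyze_flags_py packets out) := by unfold Spec_analyze_flags_py; infer_instance

-- ===== CLAIM (what is proved, stated in full; the proofs are below) =====
def Claim_equal_analyze_flags_py : Prop := ∀ (packets : List (List (String × List String))), Dom_analyze_flags_py packets → Spec_analyze_flags_py packets (analyze_flags_py packets)

-- ===== LEMMAS AND PROOFS =====

-- the count-dict's entry at f equals B's direct counting fold, for any starting dict/accumulator pair related by getD
theorem pv_fold_count (packets : List (List (String × List String))) (f : String)
    (d : PySem.Dict String Int) :
    (packets.foldl (fun d packet =>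
        ((PySem.Dict.mk packet).getD "flags" []).foldl (fun d flag => d.modify flag 0 (· + 1)) d) d).getD f 0
    = packets.foldl (fun acc p =>
        ((PySem.Dict.mk p).getD "flags" []).foldl (fun a x => if x == f then a + 1 else a) acc) (d.getD f 0) := by
  induction packets generalizing d with
  | nil => rfl
  | cons p ps ih =>
    simp only [List.foldl_cons]
    rw [ih, PySem.Dict.getD_foldl_modify_add_one, PySem.List.foldl_beq_add_one]

-- ===== VERDICT (by name: the statement is the Claim_ definition above) =====
theorem analyze_flags_py_spec : Claim_equal_analyze_flags_py := by
  intro packets _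
  show _ = _
  simp only [analyze_flags_py, analyze_flags_py_alt, List.map, pv_fold_count]
  rfl
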